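-- pv_equiv track=rewrite | github.com/CS196Illinois/FA25-Group16 | Project/Nutrition_scraping.py | extract_nutrition_value
-- ===== SOURCE A (Python) =====
-- def extract_nutrition_value(line, keyword):
--     """Extract nutrition value from a line"""
--     try:
--         keyword_pos = line.lower().find(keyword)
--         if keyword_pos == -1:
--             return None
--
--         after_keyword = line[keyword_pos + len(keyword):].strip()
--
--         value = ""
--         for char in after_keyword:
--             if char.isspace() and value:
--                 break
--             if char == '%':
--                 break
--             value += char
--
--         value = value.strip()
--         return value if value else None
--
--     except:
--         return None
-- ===== SOURCE B (Python) =====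
-- def extract_nutrition_value(line, keyword):
--     """Extract nutrition value from a line"""
--     pos = line.lower().find(keyword)
--     if pos == -1:
--         return None
--     after = line[pos + len(keyword):].strip()
--     parts = after.split()
--     token = parts[0] if parts else ""
--     cut = token.find('%')
--     value = token if cut == -1 else token[:cut]
--     return value if value else None
-- ===== Notes on version B (the rewrite author's own statement) =====
-- stated objective: simpler
-- what changed: Replaces A's character-by-character accumulator loop with break conditions (plus a redundant re-strip) by whitespace tokenization (split) taking the first token and cutting it at the first '%' via find/slice.
import Mathlib
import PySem

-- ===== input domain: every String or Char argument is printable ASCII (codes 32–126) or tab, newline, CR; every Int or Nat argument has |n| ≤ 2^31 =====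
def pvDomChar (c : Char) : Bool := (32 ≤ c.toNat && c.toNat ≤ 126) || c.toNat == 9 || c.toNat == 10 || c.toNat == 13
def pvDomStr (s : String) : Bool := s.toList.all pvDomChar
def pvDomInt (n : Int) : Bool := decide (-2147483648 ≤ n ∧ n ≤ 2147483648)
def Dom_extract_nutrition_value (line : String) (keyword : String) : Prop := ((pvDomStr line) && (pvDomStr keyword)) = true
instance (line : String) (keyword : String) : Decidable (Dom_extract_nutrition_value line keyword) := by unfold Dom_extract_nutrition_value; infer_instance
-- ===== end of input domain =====

-- B tokenizes with split() and cuts the first token at '%' instead of A's char-by-char accumulator loop; same return value.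

-- ===== PORT A =====
-- the 'for char in after_keyword' loop with its two break conditions and the growing 'value' accumulator
def pvALoop (acc : List Char) : List Char → List Char
  | [] => acc
  | c :: rest =>
    if PySem.Chars.isspace c && !acc.isEmpty then acc
    else if c == '%' then acc
    else pvALoop (acc ++ [c]) rest

def extract_nutrition_value (line : String) (keyword : String) : Option String :=
  let keyword_pos := PySem.Str.find (PySem.Str.lower line) keyword
  if keyword_pos = -1 then none
  else
    let after_keyword := PySem.Chars.strip
      (PySem.List.slice line.toList (some (keyword_pos + (PySem.Str.len keyword : Int))) none)
    let value := pvALoop [] after_keyword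
    let value := PySem.Chars.strip value
    if value.isEmpty then none else some (String.ofList value)

-- ===== PORT B =====
def extract_nutrition_value_alt (line : String) (keyword : String) : Option String :=
  let pos := PySem.Str.find (PySem.Str.lower line) keyword
  if pos = -1 then none
  else
    let after := PySem.Chars.strip
      (PySem.List.slice line.toList (some (pos + (PySem.Str.len keyword : Int))) none)
    let token := match PySem.Chars.split₀ after with
      | [] => ([] : List Char)
      | t :: _ => t
    let cut := PySem.Chars.find token ['%']
    let value := if cut = -1 then token else PySem.List.slice token none (some cut)
    if value.isEmpty then none else some (String.ofList value)

-- ===== PRECONDITION & SPEC =====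
def Spec_extract_nutrition_value (line : String) (keyword : String) (out : Option String) : Prop := out = extract_nutrition_value_alt line keyword
instance (line : String) (keyword : String) (out : Option String) : Decidable (Spec_extract_nutrition_value line keyword out) := by unfold Spec_extract_nutrition_value; infer_instance

-- ===== CLAIM (what is proved, stated in full; the proofs are below) =====
def Claim_equal_extract_nutrition_value : Prop := ∀ (line : String) (keyword : String), Dom_extract_nutrition_value line keyword → Spec_extract_nutrition_value line keyword (extract_nutrition_value line keyword)

-- ===== LEMMAS AND PROOFS =====

-- the combined keep-predicate of A's loop: chars that are neither whitespace nor '%'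
def pvKeep (c : Char) : Bool := !PySem.Chars.isspace c && !(c == '%')

theorem pvALoop_ne_nil : ∀ (l acc : List Char), acc ≠ [] →
    pvALoop acc l = acc ++ l.takeWhile pvKeep := by
  intro l
  induction l with
  | nil => intro acc _; simp [pvALoop]
  | cons c t ih =>
    intro acc h
    by_cases hs : PySem.Chars.isspace c
    · simp [pvALoop, hs, h, pvKeep]
    · by_cases hp : c == '%'
      · simp [pvALoop, hs, hp, pvKeep]
      · simp [pvALoop, hs, hp, pvKeep, ih (acc ++ [c]) (by simp)]

theorem pvALoop_nil (l : List Char) (h : ∀ c t, l = c :: t → PySem.Chars.isspace c = false) :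
    pvALoop [] l = l.takeWhile pvKeep := by
  cases l with
  | nil => rfl
  | cons c t =>
    have hs := h c t rfl
    by_cases hp : c == '%'
    · simp [pvALoop, hs, hp, pvKeep]
    · simp [pvALoop, hs, hp, pvKeep, pvALoop_ne_nil t [c] (by simp)]

theorem dropWhile_of_all_false (p : Char → Bool) (l : List Char)
    (h : ∀ c ∈ l, p c = false) : l.dropWhile p = l := by
  rw [List.dropWhile_eq_self_iff]
  intro hl
  cases l with
  | nil => simp at hl
  | cons c t => simpa using h c (by simp)

theorem strip_of_no_space (l : List Char) (h : ∀ c ∈ l, PySem.Chars.isspace c = false) :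
    PySem.Chars.strip l = l := by
  simp [PySem.Chars.strip, PySem.Chars.lstrip, PySem.Chars.rstrip,
    dropWhile_of_all_false _ _ h,
    dropWhile_of_all_false _ l.reverse (fun c hc => h c (by simpa using hc))]

theorem head?_dropWhile_false (p : Char → Bool) :
    ∀ (l : List Char) (c : Char), (l.dropWhile p).head? = some c → p c = false := by
  intro l
  induction l with
  | nil => simp
  | cons a t ih =>
    intro c
    by_cases hp : p a
    · simpa [hp] using ih c
    · simp [hp]
      rintro rfl
      simpa using hp

theorem rstrip_head (m : List Char) (c : Char) (t : List Char)
    (h : PySem.Chars.rstrip m = c :: t) : m.head? = some c := by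
  have hpre : PySem.Chars.rstrip m <+: m := by
    simpa [PySem.Chars.rstrip] using
      List.reverse_prefix.mpr (List.dropWhile_suffix (l := m.reverse) (p := PySem.Chars.isspace))
  obtain ⟨r, hr⟩ := hpre
  rw [h] at hr
  rw [← hr]
  rfl

theorem strip_head_not_space (l : List Char) :
    ∀ c t, PySem.Chars.strip l = c :: t → PySem.Chars.isspace c = false := by
  intro c t h
  exact head?_dropWhile_false _ l c (rstrip_head _ c t h)

-- split₀.go with a nonempty accumulator: the head of the result is the accumulator's last (oldest) piece
theorem split₀_go_head_acc : ∀ (l cur : List Char) (acc : List (List Char)) (a : List Char),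
    (PySem.Chars.split₀.go l cur (acc ++ [a])).head? = some a := by
  intro l
  induction l with
  | nil =>
    intro cur acc a
    by_cases hc : cur.isEmpty <;> simp [PySem.Chars.split₀.go, hc, List.reverse_append]
  | cons c rest ih =>
    intro cur acc a
    by_cases hs : PySem.Chars.isspace c
    · by_cases hc : cur.isEmpty
      · simp [PySem.Chars.split₀.go, hs, hc, ih]
      · simpa [PySem.Chars.split₀.go, hs, hc] using ih [] (cur.reverse :: acc) a
    · simp [PySem.Chars.split₀.go, hs, ih]

-- split₀.go with empty outer accumulator and nonempty current piece
theorem split₀_go_head : ∀ (l cur : List Char), cur ≠ [] →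
    (PySem.Chars.split₀.go l cur []).head? =
      some (cur.reverse ++ l.takeWhile (fun c => !PySem.Chars.isspace c)) := by
  intro l
  induction l with
  | nil =>
    intro cur h
    simp [PySem.Chars.split₀.go, List.isEmpty_iff, h]
  | cons c rest ih =>
    intro cur h
    by_cases hs : PySem.Chars.isspace c
    · have hx := split₀_go_head_acc rest [] ([] : List (List Char)) cur.reverse
      simp only [List.nil_append] at hx
      simp [PySem.Chars.split₀.go, hs, List.isEmpty_iff, h, hx]
    · simpa [PySem.Chars.split₀.go, hs, List.takeWhile_cons] using ih (c :: cur) (by simp)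

-- first token of split() on a list whose head is not whitespace
theorem split₀_head (l : List Char) (h : ∀ c t, l = c :: t → PySem.Chars.isspace c = false) :
    (match PySem.Chars.split₀ l with
      | [] => ([] : List Char)
      | t :: _ => t) = l.takeWhile (fun c => !PySem.Chars.isspace c) := by
  cases l with
  | nil => rfl
  | cons c t =>
    have hs := h c t rfl
    have hh : (PySem.Chars.split₀ (c :: t)).head? =
        some (c :: t.takeWhile (fun c => !PySem.Chars.isspace c)) := by
      have := split₀_go_head t [c] (by simp)
      simpa [PySem.Chars.split₀, PySem.Chars.split₀.go, hs] using this
    cases hp : PySem.Chars.split₀ (c :: t) with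
    | nil => rw [hp] at hh; simp at hh
    | cons x xs =>
      rw [hp] at hh
      simp at hh
      simpa [List.takeWhile_cons, hs] using hh

theorem find_go_percent : ∀ (t : List Char) (k : Nat),
    PySem.Chars.find.go ['%'] t k =
      if '%' ∈ t then (((k + (t.takeWhile (fun c => !(c == '%'))).length : Nat) : Int)) else -1 := by
  intro t
  induction t with
  | nil => intro k; simp [PySem.Chars.find.go]
  | cons c rest ih =>
    intro k
    by_cases hp : c = '%'
    · subst hp
      simp [PySem.Chars.find.go, List.isPrefixOf]
    · have hpre : (['%'].isPrefixOf (c :: rest)) = false := by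
        simp [List.isPrefixOf, Ne.symm hp]
      by_cases hm : '%' ∈ rest
      · simp [PySem.Chars.find.go, hpre, ih (k + 1), hm, hp]
        omega
      · simp [PySem.Chars.find.go, hpre, ih (k + 1), hm, hp]
        intro h
        exact absurd h.symm hp

theorem cut_percent (t : List Char) :
    (if PySem.Chars.find t ['%'] = -1 then t
     else PySem.List.slice t none (some (PySem.Chars.find t ['%']))) =
    t.takeWhile (fun c => !(c == '%')) := by
  have hfind : PySem.Chars.find t ['%'] = PySem.Chars.find.go ['%'] t 0 := rfl
  by_cases hm : '%' ∈ t
  · rw [hfind, find_go_percent t 0]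
    simp only [hm, if_true, Nat.zero_add]
    rw [if_neg (by omega)]
    rw [PySem.List.slice_to_natCast]
    exact (List.prefix_iff_eq_take.mp (List.takeWhile_prefix _)).symm
  · rw [hfind, find_go_percent t 0, if_neg hm, if_pos rfl]
    symm
    rw [List.takeWhile_eq_self_iff]
    intro a ha
    simp only [Bool.not_eq_eq_eq_not, Bool.not_true, beq_eq_false_iff_ne, ne_eq]
    intro hae
    exact hm (hae ▸ ha)

theorem takeWhile_takeWhile_bool (p q : Char → Bool) (l : List Char) :
    (l.takeWhile q).takeWhile p = l.takeWhile (fun c => q c && p c) := by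
  induction l with
  | nil => rfl
  | cons c t ih => by_cases hq : q c <;> by_cases hp : p c <;> simp [hq, hp, ih]

-- the common tail of both programs, as a function of the stripped remainder 'after'
theorem pvA_value (after : List Char)
    (hh : ∀ c t, after = c :: t → PySem.Chars.isspace c = false) :
    PySem.Chars.strip (pvALoop [] after) = after.takeWhile pvKeep := by
  rw [pvALoop_nil after hh]
  apply strip_of_no_space
  intro c hc
  have := List.mem_takeWhile_imp hc
  simp only [pvKeep, Bool.and_eq_true, Bool.not_eq_eq_eq_not, Bool.not_true] at this
  exact this.1

theorem pvB_value (after : List Char)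
    (hh : ∀ c t, after = c :: t → PySem.Chars.isspace c = false) :
    (if PySem.Chars.find
        (match PySem.Chars.split₀ after with
          | [] => ([] : List Char)
          | t :: _ => t) ['%'] = -1 then
      (match PySem.Chars.split₀ after with
        | [] => ([] : List Char)
        | t :: _ => t)
    else PySem.List.slice
        (match PySem.Chars.split₀ after with
          | [] => ([] : List Char)
          | t :: _ => t) none
        (some (PySem.Chars.find
          (match PySem.Chars.split₀ after with
            | [] => ([] : List Char)
            | t :: _ => t) ['%']))) = after.takeWhile pvKeep := by
  rw [split₀_head after hh, cut_percent, takeWhile_takeWhile_bool]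
  rfl

-- ===== VERDICT (by name: the statement is the Claim_ definition above) =====
theorem extract_nutrition_value_spec : Claim_equal_extract_nutrition_value := by
  intro line keyword _
  unfold Spec_extract_nutrition_value
  by_cases hf : PySem.Str.find (PySem.Str.lower line) keyword = -1
  · simp only [extract_nutrition_value, extract_nutrition_value_alt, if_pos hf]
  · simp only [extract_nutrition_value, extract_nutrition_value_alt, if_neg hf]
    rw [pvA_value _ (fun c t h => strip_head_not_space _ c t h),
      pvB_value _ (fun c t h => strip_head_not_space _ c t h)]
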